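-- pv_equiv track=rewrite | github.com/jonathanverner/brython-jinja2 | src/brython_jinja2/expression.py | parse_identifier
-- ===== SOURCE A (Python) =====
-- def parse_identifier(expr: str, pos: int):
--     """
--         Parses an identifier. Which should match /[a-z_$0-9]/i
--     """
--     ret = expr[pos]
--     pos = pos + 1
--     while pos < len(expr):
--         char_ord = ord(expr[pos])
--         if not ((char_ord >= 48 and char_ord <= 57) or (char_ord >= 65 and char_ord <= 90) or (char_ord >= 97 and char_ord <= 122) or char_ord == 36 or char_ord == 95):
--             break
--         ret += expr[pos]
--         pos = pos + 1
--     return ret, pos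
-- ===== SOURCE B (Python) =====
-- import re
--
-- _id = re.compile(r'[0-9A-Za-z$_]*')
--
-- def parse_identifier(expr: str, pos: int):
--     """
--         Parses an identifier. Which should match /[a-z_$0-9]/i
--     """
--     first = expr[pos]
--     m = _id.match(expr, pos + 1)
--     return first + m.group(), m.end()
-- ===== Notes on version B (the rewrite author's own statement) =====
-- stated objective: idiomatic
-- what changed: replaces the hand-written ord-range while loop and character-by-character string accumulator with a single precompiled regex match of the identifier character class (scanned in C by the re engine) after the unconditionally included first character
-- outside the precondition, e.g. on parse_identifier('ab', -2): A returns ('abab', 2), B returns ('aab', 2); on parse_identifier('a!', -2): A returns ('a', -1), B returns ('aa', 1)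
import Mathlib
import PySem

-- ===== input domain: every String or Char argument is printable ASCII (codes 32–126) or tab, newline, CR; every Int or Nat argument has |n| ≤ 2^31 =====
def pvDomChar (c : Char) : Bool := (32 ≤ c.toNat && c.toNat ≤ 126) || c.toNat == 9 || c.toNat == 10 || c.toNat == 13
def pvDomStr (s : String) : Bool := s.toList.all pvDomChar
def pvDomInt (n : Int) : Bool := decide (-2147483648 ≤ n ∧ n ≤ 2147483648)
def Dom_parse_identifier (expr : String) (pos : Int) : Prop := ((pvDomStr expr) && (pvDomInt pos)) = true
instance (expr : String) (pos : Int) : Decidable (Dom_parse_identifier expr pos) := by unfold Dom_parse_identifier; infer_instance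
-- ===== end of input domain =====

-- B replaces A's hand-written ord-range while loop by a single regex-style class match
-- after the unconditionally included first character (objective: idiomatic).


-- ===== PORT A =====
def pvIsIdA (c : Char) : Bool :=
  let o := c.toNat
  (48 ≤ o && o ≤ 57) || (65 ≤ o && o ≤ 90) || (97 ≤ o && o ≤ 122) || o == 36 || o == 95

def pvLoopA (l : List Char) (ret : List Char) (pos : Int) : List Char × Int :=
  if pos < (l.length : Int) then
    match PySem.List.pyGet? l pos with
    | some c => if pvIsIdA c then pvLoopA l (ret ++ [c]) (pos + 1) else (ret, pos)
    | none => (ret, pos)   -- Python raises here; reachable only outside Pre_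
  else (ret, pos)
termination_by ((l.length : Int) - pos).toNat
decreasing_by omega

def parse_identifier (expr : String) (pos : Int) : String × Int :=
  match PySem.Str.pyGet? expr pos with
  | some c =>
      let rp := pvLoopA expr.toList [c] (pos + 1)
      (String.mk rp.1, rp.2)
  | none => ("", 0)   -- Python raises IndexError; excluded by Pre_

-- ===== PORT B =====
def pvIsIdB (c : Char) : Bool := c.isDigit || c.isAlpha || c == '$' || c == '_'

-- hand port of `_id.match(expr, p)` for the precompiled regex r'[0-9A-Za-z$_]*',
-- returning (group, end): exact for p ≤ len (re clamps a negative start position to 0;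
-- '*' greedily takes the longest prefix of the class, i.e. takeWhile); ASCII class.
def pvReMatchIdStar (l : List Char) (p : Int) : List Char × Int :=
  let start := max p 0
  let g := (l.drop start.toNat).takeWhile pvIsIdB
  (g, start + g.length)

def parse_identifier_alt (expr : String) (pos : Int) : String × Int :=
  match PySem.Str.pyGet? expr pos with
  | some first =>
      let m := pvReMatchIdStar expr.toList (pos + 1)
      (String.mk (first :: m.1), m.2)
  | none => ("", 0)   -- Python raises IndexError; excluded by Pre_

-- ===== PRECONDITION & SPEC =====
-- Pre_ excludes pos outside [-len, len), where A raises IndexError, and also the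
-- positions -len ≤ pos ≤ -2 on which A still returns: there A's loop wraps around via
-- Python negative indexing while the regex scan clamps to the string start — both values
-- are accidents of the two implementations, meaningless for a parser position
-- (pos = -1, whose scan starts at index 0 in both, is kept inside).
def Pre_parse_identifier (expr : String) (pos : Int) : Prop :=
  -1 ≤ pos ∧ pos < (expr.toList.length : Int) ∧ -(expr.toList.length : Int) ≤ pos
instance (expr : String) (pos : Int) : Decidable (Pre_parse_identifier expr pos) := by
  unfold Pre_parse_identifier; infer_instance

def pvWitness_parse_identifier : String × Int := ("ab$_9 z", 0)

def Spec_parse_identifier (expr : String) (pos : Int) (out : String × Int) : Prop := out = parse_identifier_alt expr pos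
instance (expr : String) (pos : Int) (out : String × Int) : Decidable (Spec_parse_identifier expr pos out) := by unfold Spec_parse_identifier; infer_instance

-- ===== CLAIM (what is proved, stated in full; the proofs are below) =====
def Claim_equal_parse_identifier : Prop := ∀ (expr : String) (pos : Int), Dom_parse_identifier expr pos → Pre_parse_identifier expr pos → Spec_parse_identifier expr pos (parse_identifier expr pos)

-- ===== LEMMAS AND PROOFS =====

-- A's ord-range test and B's character-class test agree on every character
theorem pvIsId_eq : pvIsIdA = pvIsIdB := by
  funext c
  rw [Bool.eq_iff_iff]
  simp only [pvIsIdA, pvIsIdB, Char.isDigit, Char.isAlpha, Char.isUpper, Char.isLower,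
    Char.toNat, Char.ext_iff, UInt32.le_iff_toNat_le, UInt32.ext_iff,
    Bool.or_eq_true, Bool.and_eq_true, decide_eq_true_eq, beq_iff_eq, ge_iff_le,
    show '0'.val.toNat = 48 from rfl, show '9'.val.toNat = 57 from rfl,
    show 'A'.val.toNat = 65 from rfl, show 'Z'.val.toNat = 90 from rfl,
    show 'a'.val.toNat = 97 from rfl, show 'z'.val.toNat = 122 from rfl,
    show '$'.val.toNat = 36 from rfl, show '_'.val.toNat = 95 from rfl]
  omega

-- A's while loop, started at a nonnegative position, is takeWhile on the dropped suffix
theorem pvLoopA_eq (l : List Char) (p : Nat) (ret : List Char) :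
    pvLoopA l ret (p : Int) =
      (ret ++ (l.drop p).takeWhile pvIsIdA,
       (p : Int) + ((l.drop p).takeWhile pvIsIdA).length) := by
  have main : ∀ (k p : Nat) (ret : List Char), l.length - p ≤ k →
      pvLoopA l ret (p : Int) =
        (ret ++ (l.drop p).takeWhile pvIsIdA,
         (p : Int) + ((l.drop p).takeWhile pvIsIdA).length) := by
    intro k
    induction k with
    | zero =>
      intro p ret h
      have hp : ¬ p < l.length := by omega
      rw [pvLoopA]
      simp [hp, List.drop_eq_nil_of_le (Nat.le_of_not_lt hp)]
    | succ k ih =>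
      intro p ret h
      rw [pvLoopA]
      by_cases hp : p < l.length
      · have hc : ((p : Int)) < (l.length : Int) := by exact_mod_cast hp
        rw [if_pos hc, PySem.List.pyGet?_natCast, List.getElem?_eq_getElem hp,
            List.drop_eq_getElem_cons hp]
        cases hid : pvIsIdA l[p] with
        | false => simp [hid]
        | true =>
          simp only [hid, List.takeWhile_cons, if_pos]
          have hc1 : ((p : Int)) + 1 = (((p + 1 : Nat)) : Int) := by push_cast; ring
          rw [hc1, ih (p + 1) (ret ++ [l[p]]) (by omega)]
          simp [List.append_assoc]
          omega
      · have hc : ¬ ((p : Int)) < (l.length : Int) := by exact_mod_cast hp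
        rw [if_neg hc]
        simp [List.drop_eq_nil_of_le (Nat.le_of_not_lt hp)]
  exact main l.length p ret (Nat.sub_le _ _)

-- ===== VERDICT (by name: the statement is the Claim_ definition above) =====
theorem parse_identifier_spec : Claim_equal_parse_identifier := by
  intro expr pos _ hpre
  obtain ⟨h1, _, _⟩ := hpre
  unfold Spec_parse_identifier parse_identifier parse_identifier_alt
  cases hg : PySem.Str.pyGet? expr pos with
  | none => rfl
  | some c =>
    dsimp only
    rw [show pos + 1 = (((pos + 1).toNat : Nat) : Int) by omega]
    rw [pvLoopA_eq expr.toList (pos + 1).toNat [c]]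
    have hmax : (max (pos + 1) 0).toNat = (pos + 1).toNat := by omega
    simp [pvReMatchIdStar, pvIsId_eq, hmax]
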